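-- pv_equiv track=rewrite | github.com/marctjones/klareco | scripts/categorize_vocabulary.py | convert_x_system
-- ===== SOURCE A (Python) =====
-- def convert_x_system(text: str) -> str:
--     """Convert x-system to proper Esperanto characters."""
--     replacements = {
--         'cx': 'ĉ', 'gx': 'ĝ', 'sx': 'ŝ', 'ux': 'ŭ', 'jx': 'ĵ', 'hx': 'ĥ',
--         'Cx': 'Ĉ', 'Gx': 'Ĝ', 'Sx': 'Ŝ', 'Ux': 'Ŭ', 'Jx': 'Ĵ', 'Hx': 'Ĥ',
--     }
--     for old, new in replacements.items():
--         text = text.replace(old, new)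
--     return text
-- ===== SOURCE B (Python) =====
-- def convert_x_system(text: str) -> str:
--     """Convert x-system to proper Esperanto characters in one left-to-right pass."""
--     base = {
--         'c': 'ĉ', 'g': 'ĝ', 's': 'ŝ', 'u': 'ŭ', 'j': 'ĵ', 'h': 'ĥ',
--         'C': 'Ĉ', 'G': 'Ĝ', 'S': 'Ŝ', 'U': 'Ŭ', 'J': 'Ĵ', 'H': 'Ĥ',
--     }
--     out = []
--     i = 0
--     n = len(text)
--     while i < n:
--         c = text[i]
--         if i + 1 < n and text[i + 1] == 'x' and c in base:
--             out.append(base[c])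
--             i += 2
--         else:
--             out.append(c)
--             i += 1
--     return ''.join(out)
-- ===== Notes on version B (the rewrite author's own statement) =====
-- stated objective: alternative
-- what changed: Replaces twelve sequential whole-string str.replace passes by a single left-to-right scan that looks at each position once, consuming a letter+'x' digraph via one dict lookup or copying one character.
import Mathlib
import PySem

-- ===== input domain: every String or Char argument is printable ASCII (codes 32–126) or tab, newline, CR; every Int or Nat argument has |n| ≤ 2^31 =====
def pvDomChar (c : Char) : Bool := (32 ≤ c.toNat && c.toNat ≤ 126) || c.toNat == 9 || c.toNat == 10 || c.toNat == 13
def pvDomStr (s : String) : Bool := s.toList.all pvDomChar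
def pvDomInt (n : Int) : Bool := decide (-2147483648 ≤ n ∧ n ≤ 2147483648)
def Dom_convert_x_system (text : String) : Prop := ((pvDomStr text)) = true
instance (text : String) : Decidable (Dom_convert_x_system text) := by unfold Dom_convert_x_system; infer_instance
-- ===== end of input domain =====

-- B replaces A's twelve sequential whole-string str.replace passes by a single
-- left-to-right scan (objective: alternative, same result, one traversal).

-- ===== PORT A =====
-- the dict literal of A, as an association list in insertion order
def replacements : List (String × String) :=
  [("cx", "ĉ"), ("gx", "ĝ"), ("sx", "ŝ"), ("ux", "ŭ"), ("jx", "ĵ"), ("hx", "ĥ"),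
   ("Cx", "Ĉ"), ("Gx", "Ĝ"), ("Sx", "Ŝ"), ("Ux", "Ŭ"), ("Jx", "Ĵ"), ("Hx", "Ĥ")]

-- A: for old, new in replacements.items(): text = text.replace(old, new)
def convert_x_system (text : String) : String :=
  replacements.foldl (fun t p => PySem.Str.replace t p.1 p.2) text

-- ===== PORT B =====
-- B's dict keyed by the base letter, as an association list in insertion order
def xbase : List (Char × Char) :=
  [('c', 'ĉ'), ('g', 'ĝ'), ('s', 'ŝ'), ('u', 'ŭ'), ('j', 'ĵ'), ('h', 'ĥ'),
   ('C', 'Ĉ'), ('G', 'Ĝ'), ('S', 'Ŝ'), ('U', 'Ŭ'), ('J', 'Ĵ'), ('H', 'Ĥ')]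

-- B's while loop: one left-to-right scan; on letter+'x' with the letter in the
-- dict emit the diacritic and advance by 2, otherwise copy one character
def convertLoop : List Char → List Char
  | [] => []
  | [c] => [c]
  | c :: c2 :: rest =>
    if c2 = 'x' then
      match xbase.lookup c with
      | some d => d :: convertLoop rest
      | none => c :: convertLoop (c2 :: rest)
    else c :: convertLoop (c2 :: rest)

def convert_x_system_alt (text : String) : String :=
  String.ofList (convertLoop text.toList)

-- ===== PRECONDITION & SPEC =====
def Spec_convert_x_system (text : String) (out : String) : Prop := out = convert_x_system_alt text
instance (text : String) (out : String) : Decidable (Spec_convert_x_system text out) := by unfold Spec_convert_x_system; infer_instance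

-- ===== CLAIM (what is proved, stated in full; the proofs are below) =====
def Claim_equal_convert_x_system : Prop := ∀ (text : String), Dom_convert_x_system text → Spec_convert_x_system text (convert_x_system text)

-- ===== LEMMAS AND PROOFS =====

-- A single scan with an abstract lookup function (proof device relating both sides).
def scan1 (f : Char → Option Char) : List Char → List Char
  | [] => []
  | [c] => [c]
  | c :: c2 :: rest =>
    if c2 = 'x' then
      match f c with
      | some d => d :: scan1 f rest
      | none => c :: scan1 f (c2 :: rest)
    else c :: scan1 f (c2 :: rest)

theorem scan1_cons_none (f : Char → Option Char) (c : Char) (rest : List Char)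
    (h : f c = none) : scan1 f (c :: rest) = c :: scan1 f rest := by
  cases rest with
  | nil => simp [scan1]
  | cons c2 r =>
    by_cases hx : c2 = 'x'
    · subst hx; simp [scan1, h]
    · simp [scan1, hx]

theorem scan1_cons_not_x (f : Char → Option Char) (c : Char) (rest : List Char)
    (hr : rest.head? ≠ some 'x') : scan1 f (c :: rest) = c :: scan1 f rest := by
  cases rest with
  | nil => simp [scan1]
  | cons c2 r =>
    have hx : c2 ≠ 'x' := by simpa using hr
    simp [scan1, hx]

theorem scan1_two_some (f : Char → Option Char) (c d : Char) (rest : List Char)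
    (h : f c = some d) : scan1 f (c :: 'x' :: rest) = d :: scan1 f rest := by
  simp [scan1, h]

theorem scan1_const_none (l : List Char) : scan1 (fun _ => none) l = l := by
  induction l with
  | nil => rfl
  | cons c rest ih => rw [scan1_cons_none _ _ _ rfl, ih]

-- the head of a scan result is either an emitted value or the original head
theorem scan1_head_ne (f : Char → Option Char)
    (hval : ∀ c d', f c = some d' → d' ≠ 'x') (r : List Char)
    (hr : r.head? ≠ some 'x') : (scan1 f r).head? ≠ some 'x' := by
  cases r with
  | nil => simp [scan1]
  | cons c rest =>
    have hc : c ≠ 'x' := by simpa using hr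
    cases rest with
    | nil => simpa [scan1] using hc
    | cons c2 r' =>
      by_cases hx : c2 = 'x'
      · subst hx
        cases hfc : f c with
        | none => simpa [scan1, hfc] using hc
        | some d => simpa [scan1, hfc] using hval c d hfc
      · simpa [scan1, hx] using hc

-- Commuting lemma: a single-key scan applied to the output of the scan for f
-- equals the scan for f extended by a ↦ d.
theorem scan1_comm (f g : Char → Option Char) (a d : Char)
    (h1 : ∀ c, c ≠ a → g c = f c) (h2 : g a = some d) (h3 : f a = none)
    (hfx : f 'x' = none) (hax : a ≠ 'x')
    (hval : ∀ c d', f c = some d' → d' ≠ a ∧ d' ≠ 'x') :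
    ∀ (n : Nat) (s : List Char), s.length ≤ n →
      scan1 (fun c => if c = a then some d else none) (scan1 f s) = scan1 g s := by
  intro n
  induction n with
  | zero =>
    intro s hs
    have : s = [] := List.eq_nil_of_length_eq_zero (Nat.le_zero.mp hs)
    subst this; rfl
  | succ n ih =>
    intro s hs
    match s with
    | [] => rfl
    | [c] => rfl
    | c :: c2 :: rest =>
      have hlen2 : rest.length ≤ n := by simp at hs; omega
      have hlen1 : (c2 :: rest).length ≤ n := by simp at hs; simp; omega
      by_cases hx : c2 = 'x'
      · subst hx
        cases hfc : f c with
        | some dj =>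
          -- f consumes the digraph; the emitted dj is inert for the single-key scan
          have hdj := hval c dj hfc
          have hca : c ≠ a := fun h => by rw [h, h3] at hfc; cases hfc
          rw [scan1_two_some f c dj rest hfc,
              scan1_cons_none _ dj _ (by simp [hdj.1]),
              ih rest hlen2,
              scan1_two_some g c dj rest (by rw [h1 c hca, hfc])]
        | none =>
          by_cases hca : c = a
          · subst hca
            -- the new key fires here
            rw [scan1_cons_none f c _ hfc, scan1_cons_none f 'x' rest hfx,
                scan1_two_some _ c d _ (by simp),
                ih rest hlen2,
                scan1_two_some g c d rest h2]
          · -- neither the old keys nor the new key fire on this 'x' digraph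
            rw [scan1_cons_none f c _ hfc, scan1_cons_none f 'x' rest hfx,
                scan1_cons_none _ c _ (by simp [hca]),
                scan1_cons_none _ 'x' _ (by simp [Ne.symm hax]),
                ih rest hlen2,
                scan1_cons_none g c _ (by rw [h1 c hca, hfc]),
                scan1_cons_none g 'x' rest (by rw [h1 'x' (Ne.symm hax), hfx])]
      · -- no 'x' follows: both scans copy c
        have hstep : scan1 f (c :: c2 :: rest) = c :: scan1 f (c2 :: rest) := by
          cases hfc : f c with
          | some dj => simp [scan1, hx]
          | none => exact scan1_cons_none f c _ hfc
        have hhead : (scan1 f (c2 :: rest)).head? ≠ some 'x' :=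
          scan1_head_ne f (fun c d' h => (hval c d' h).2) (c2 :: rest) (by simpa using hx)
        rw [hstep, scan1_cons_not_x _ c _ hhead, ih (c2 :: rest) hlen1,
            scan1_cons_not_x g c (c2 :: rest) (by simpa using hx)]

-- str.replace with a two-character pattern letter+'x' IS a single-key scan
theorem go_eq (a d : Char) : ∀ (fuel : Nat) (l acc : List Char), l.length ≤ fuel →
    PySem.Chars.replace.go [a, 'x'] [d] fuel l acc
      = acc.reverse ++ scan1 (fun c => if c = a then some d else none) l := by
  intro fuel
  induction fuel with
  | zero =>
    intro l acc hl
    have : l = [] := List.eq_nil_of_length_eq_zero (Nat.le_zero.mp hl)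
    subst this
    rw [PySem.Chars.replace.go.eq_def]
    simp [scan1]
  | succ fuel ih =>
    intro l acc hl
    match l with
    | [] =>
      rw [PySem.Chars.replace.go.eq_def]
      simp [scan1]
    | [c] =>
      have hpre : [a, 'x'].isPrefixOf [c] = false := by simp [List.isPrefixOf]
      rw [PySem.Chars.replace.go.eq_def]
      show (if [a, 'x'].isPrefixOf [c] = true then _ else _) = _
      rw [hpre]
      simp only [Bool.false_eq_true, if_false]
      cases fuel <;> rw [PySem.Chars.replace.go.eq_def] <;> simp [scan1]
    | c :: c2 :: t =>
      have hlen2 : t.length ≤ fuel := by simp at hl; omega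
      have hlen1 : (c2 :: t).length ≤ fuel := by simp at hl; simp; omega
      by_cases hm : c = a ∧ c2 = 'x'
      · obtain ⟨rfl, rfl⟩ := hm
        have hpre : [c, 'x'].isPrefixOf (c :: 'x' :: t) = true := by simp [List.isPrefixOf]
        rw [PySem.Chars.replace.go.eq_def]
        show (if [c, 'x'].isPrefixOf (c :: 'x' :: t) = true then
            PySem.Chars.replace.go [c, 'x'] [d] fuel (List.drop [c, 'x'].length (c :: 'x' :: t)) ([d].reverse ++ acc)
          else _) = _
        rw [hpre]
        simp only [if_true]
        show PySem.Chars.replace.go [c, 'x'] [d] fuel t ([d].reverse ++ acc) = _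
        rw [ih t ([d].reverse ++ acc) hlen2,
            scan1_two_some _ c d t (by simp)]
        simp
      · have hpre : [a, 'x'].isPrefixOf (c :: c2 :: t) = false := by
          simp [List.isPrefixOf]
          intro h1 h2
          exact absurd ⟨h1.symm, h2.symm⟩ hm
        rw [PySem.Chars.replace.go.eq_def]
        show (if [a, 'x'].isPrefixOf (c :: c2 :: t) = true then _ else
            PySem.Chars.replace.go [a, 'x'] [d] fuel (c2 :: t) (c :: acc)) = _
        rw [hpre]
        simp only [Bool.false_eq_true, if_false]
        rw [ih (c2 :: t) (c :: acc) hlen1]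
        have hcopy : scan1 (fun c' => if c' = a then some d else none) (c :: c2 :: t)
            = c :: scan1 (fun c' => if c' = a then some d else none) (c2 :: t) := by
          by_cases hx : c2 = 'x'
          · have hca : c ≠ a := fun h => hm ⟨h, hx⟩
            exact scan1_cons_none _ c _ (by simp [hca])
          · exact scan1_cons_not_x _ c _ (by simpa using hx)
        rw [hcopy]
        simp

theorem replace_eq_scan1 (a d : Char) (s : List Char) :
    PySem.Chars.replace s [a, 'x'] [d]
      = scan1 (fun c => if c = a then some d else none) s := by
  have h := go_eq a d s.length s [] (le_refl _)
  simpa [PySem.Chars.replace] using h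

theorem lookup_mem {l : List (Char × Char)} {a b : Char}
    (h : l.lookup a = some b) : (a, b) ∈ l := by
  induction l with
  | nil => simp [List.lookup] at h
  | cons p t ih =>
    obtain ⟨k, v⟩ := p
    rw [List.lookup_cons] at h
    by_cases hk : a = k
    · simp [hk] at h
      subst h hk
      exact List.mem_cons_self
    · have hb : (a == k) = false := by simpa using hk
      simp [hb] at h
      exact List.mem_cons_of_mem _ (ih h)

theorem lookup_eq_none_of_not_key {l : List (Char × Char)} {a : Char}
    (h : ∀ p ∈ l, p.1 ≠ a) : l.lookup a = none := by
  cases hl : l.lookup a with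
  | none => rfl
  | some b => exact absurd rfl (h _ (lookup_mem hl))

-- one table step: single-key scan after the scan for L = scan for L ++ [(a,d)]
theorem stepL (L : List (Char × Char)) (a d : Char)
    (hval : ∀ p ∈ L, p.2 ≠ a ∧ p.2 ≠ 'x')
    (ha : L.lookup a = none) (hx : L.lookup 'x' = none) (hax : a ≠ 'x')
    (s : List Char) :
    scan1 (fun c => if c = a then some d else none) (scan1 (fun c => L.lookup c) s)
      = scan1 (fun c => (L ++ [(a, d)]).lookup c) s := by
  refine scan1_comm (fun c => L.lookup c) (fun c => (L ++ [(a, d)]).lookup c) a d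
    ?_ ?_ ha hx hax ?_ s.length s (le_refl _)
  · intro c hc
    show List.lookup c (L ++ [(a, d)]) = List.lookup c L
    rw [List.lookup_append]
    cases h : L.lookup c with
    | some b => simp
    | none =>
      have hb : (c == a) = false := by simpa using hc
      simp [List.lookup, hb]
  · show List.lookup a (L ++ [(a, d)]) = some d
    rw [List.lookup_append, ha]
    simp [List.lookup]
  · intro c d' h
    exact hval _ (lookup_mem h)

-- table well-formedness: keys pairwise distinct, no key is 'x', values hit
-- neither 'x' nor any key
def goodTable (T : List (Char × Char)) : Prop :=
  (T.map Prod.fst).Nodup ∧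
    ∀ p ∈ T, p.1 ≠ 'x' ∧ p.2 ≠ 'x' ∧ ∀ q ∈ T, p.2 ≠ q.1

theorem chain_scan1 : ∀ (M pre : List (Char × Char)), goodTable (pre ++ M) →
    ∀ (l : List Char),
      M.foldl (fun t p => PySem.Chars.replace t [p.1, 'x'] [p.2])
        (scan1 (fun c => pre.lookup c) l)
      = scan1 (fun c => (pre ++ M).lookup c) l := by
  intro M
  induction M with
  | nil =>
    intro pre _ l
    rw [List.foldl_nil, List.append_nil]
  | cons p M ih =>
    obtain ⟨a, d⟩ := p
    intro pre hgood l
    have hmem : (a, d) ∈ pre ++ (a, d) :: M := by simp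
    have hax : a ≠ 'x' := (hgood.2 _ hmem).1
    have hval : ∀ q ∈ pre, q.2 ≠ a ∧ q.2 ≠ 'x' := by
      intro q hq
      have hq' : q ∈ pre ++ (a, d) :: M := List.mem_append_left _ hq
      exact ⟨(hgood.2 _ hq').2.2 _ hmem, (hgood.2 _ hq').2.1⟩
    have hkeys : ∀ q ∈ pre, q.1 ≠ a := by
      have hnd := hgood.1
      rw [List.map_append] at hnd
      have hdisj := (List.nodup_append.mp hnd).2.2
      intro q hq heq
      exact hdisj q.1 (List.mem_map_of_mem hq) a (by simp) heq
    have ha : pre.lookup a = none := lookup_eq_none_of_not_key hkeys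
    have hxl : pre.lookup 'x' = none := lookup_eq_none_of_not_key
      (fun q hq => (hgood.2 _ (List.mem_append_left _ hq)).1)
    have hgood' : goodTable ((pre ++ [(a, d)]) ++ M) := by
      simpa [List.append_assoc] using hgood
    calc ((a, d) :: M).foldl (fun t p => PySem.Chars.replace t [p.1, 'x'] [p.2])
          (scan1 (fun c => pre.lookup c) l)
        = M.foldl (fun t p => PySem.Chars.replace t [p.1, 'x'] [p.2])
            (PySem.Chars.replace (scan1 (fun c => pre.lookup c) l) [a, 'x'] [d]) := by
          simp [List.foldl_cons]
      _ = M.foldl (fun t p => PySem.Chars.replace t [p.1, 'x'] [p.2])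
            (scan1 (fun c => (pre ++ [(a, d)]).lookup c) l) := by
          rw [replace_eq_scan1, stepL pre a d hval ha hxl hax l]
      _ = scan1 (fun c => ((pre ++ [(a, d)]) ++ M).lookup c) l := ih (pre ++ [(a, d)]) hgood' l
      _ = scan1 (fun c => (pre ++ (a, d) :: M).lookup c) l := by
          simp [List.append_assoc]

theorem convertLoop_eq_scan1 : ∀ (n : Nat) (l : List Char), l.length ≤ n →
    convertLoop l = scan1 (fun c => xbase.lookup c) l := by
  intro n
  induction n with
  | zero =>
    intro l hl
    have : l = [] := List.eq_nil_of_length_eq_zero (Nat.le_zero.mp hl)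
    subst this; rfl
  | succ n ih =>
    intro l hl
    match l with
    | [] => rfl
    | [c] => rfl
    | c :: c2 :: rest =>
      have hlen2 : rest.length ≤ n := by simp at hl; omega
      have hlen1 : (c2 :: rest).length ≤ n := by simp at hl; simp; omega
      by_cases hx : c2 = 'x'
      · subst hx
        cases hfc : xbase.lookup c with
        | some d => simp [convertLoop, scan1, hfc, ih rest hlen2]
        | none => simp [convertLoop, scan1, hfc, ih ('x' :: rest) hlen1]
      · simp [convertLoop, scan1, hx, ih (c2 :: rest) hlen1]

theorem good_xbase : goodTable xbase := by
  unfold goodTable xbase; decide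

theorem toList_A_eq (text : String) :
    (convert_x_system text).toList
      = xbase.foldl (fun t p => PySem.Chars.replace t [p.1, 'x'] [p.2]) text.toList := by
  simp only [convert_x_system, replacements, xbase, List.foldl_cons, List.foldl_nil,
    PySem.Str.toList_replace]
  rfl

-- ===== VERDICT (by name: the statement is the Claim_ definition above) =====
theorem convert_x_system_spec : Claim_equal_convert_x_system := by
  intro text _
  unfold Spec_convert_x_system
  apply String.ext
  rw [toList_A_eq]
  have h0 : text.toList = scan1 (fun c => ([] : List (Char × Char)).lookup c) text.toList := by
    have he : (fun c => ([] : List (Char × Char)).lookup c)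
        = (fun _ : Char => (none : Option Char)) := rfl
    rw [he, scan1_const_none]
  rw [h0, chain_scan1 xbase [] (by simpa using good_xbase) text.toList]
  have halt : (convert_x_system_alt text).toList = convertLoop text.toList := by
    simp [convert_x_system_alt]
  rw [halt, convertLoop_eq_scan1 text.toList.length text.toList (le_refl _)]
  rfl
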